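-- pv_equiv track=rewrite | github.com/jinho-waah/Practice | 백준/Gold/5557. 1학년/1학년.py | count_valid_equations
-- ===== SOURCE A (Python) =====
-- def count_valid_equations(n, numbers):
--     # DP 테이블 초기화: dp[i][j]는 i번째 숫자까지 계산했을 때 값 j가 나오는 경우의 수
--     dp = [[0] * 21 for _ in range(n)]
--     dp[0][numbers[0]] = 1  # 첫 번째 숫자는 그대로 사용
--
--     # DP 계산
--     for i in range(1, n - 1):  # 마지막 숫자는 결과로 사용하므로 제외
--         for j in range(21):  # 가능한 값은 0~20
--             if dp[i - 1][j] > 0:  # 이전 단계에서 유효한 값만 고려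
--                 if j + numbers[i] <= 20:  # 덧셈
--                     dp[i][j + numbers[i]] += dp[i - 1][j]
--                 if j - numbers[i] >= 0:  # 뺄셈
--                     dp[i][j - numbers[i]] += dp[i - 1][j]
--
--     # 마지막 숫자를 결과로 사용
--     return dp[n - 2][numbers[-1]]
-- ===== SOURCE B (Python) =====
-- def count_valid_equations(n, numbers):
--     # Top-down memoized recursion: rec(i, j) = number of ways the prefix
--     # numbers[0..i] can evaluate to j (0 <= j <= 20).
--     memo = {}
--
--     def rec(i, j):
--         if i == 0:
--             return 1 if j == numbers[0] else 0
--         if (i, j) not in memo: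
--             total = 0
--             if j - numbers[i] >= 0:      # previous value, reached by adding numbers[i]
--                 total += rec(i - 1, j - numbers[i])
--             if j + numbers[i] <= 20:     # previous value, reached by subtracting numbers[i]
--                 total += rec(i - 1, j + numbers[i])
--             memo[(i, j)] = total
--         return memo[(i, j)]
--
--     if n == 1:
--         return rec(0, numbers[-1])
--     return rec(n - 2, numbers[-1])
-- ===== Notes on version B (the rewrite author's own statement) =====
-- stated objective: alternative
-- what changed: Replaces A's forward tabulated DP (an n x 21 table filled by a full sweep over all rows and all 21 cells) with a top-down memoized recursion on (index, partial value) that starts from the target value and fills only reachable states on demand.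
-- intended difference: On one- and two-number inputs whose first and last numbers differ by exactly 21, A's negative index into its 21-cell row wraps around onto the cell set for the first number and A returns 1, while B returns 0, the intended count, since a single number never equals a different target value. — e.g. on count_valid_equations(2, [20, -1]): A returns 1, B returns 0
-- outside the precondition, e.g. on count_valid_equations(3, [-1, 0, 20]): A returns 2, B returns 0; on count_valid_equations(3, [0, -3, 18]): A returns 1, B returns 0; on count_valid_equations(5, [10, 18, 6]): A returns 0, B raises IndexError
import Mathlib
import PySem

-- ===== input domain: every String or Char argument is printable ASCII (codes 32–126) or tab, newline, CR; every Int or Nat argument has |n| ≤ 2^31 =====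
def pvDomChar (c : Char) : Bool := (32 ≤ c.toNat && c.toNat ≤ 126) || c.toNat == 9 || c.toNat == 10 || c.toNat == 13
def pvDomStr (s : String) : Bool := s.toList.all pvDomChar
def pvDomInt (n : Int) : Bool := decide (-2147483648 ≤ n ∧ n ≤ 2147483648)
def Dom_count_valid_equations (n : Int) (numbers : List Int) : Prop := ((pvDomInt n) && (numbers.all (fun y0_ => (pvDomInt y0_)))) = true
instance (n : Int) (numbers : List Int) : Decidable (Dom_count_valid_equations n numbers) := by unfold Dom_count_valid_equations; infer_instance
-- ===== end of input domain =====

-- B replaces A's forward tabulated DP sweep by a top-down memoized recursion on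
-- (index, partial value), filling only reachable states on demand (objective: alternative).

-- ===== PORT A =====
-- inner body of A's 'for j in range(21)' loop (dp[i-1] = prev, numbers[i] = num, dp[i] = row)
def cveInner (prev : List Int) (num : Int) (row : List Int) (j : Int) : List Int :=
  if PySem.List.pyGetD prev j 0 > 0 then
    let row1 :=
      if j + num ≤ 20 then
        PySem.List.pySetD row (j + num)
          (PySem.List.pyGetD row (j + num) 0 + PySem.List.pyGetD prev j 0)
      else row
    if j - num ≥ 0 then
      PySem.List.pySetD row1 (j - num)
        (PySem.List.pyGetD row1 (j - num) 0 + PySem.List.pyGetD prev j 0)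
    else row1
  else row

-- one iteration of A's outer 'for i in range(1, n - 1)' loop
def cveStep (numbers : List Int) (dp : List (List Int)) (i : Int) : List (List Int) :=
  PySem.List.pySetD dp i
    ((PySem.List.pyRange 0 21 1).foldl
      (cveInner (PySem.List.pyGetD dp (i - 1) []) (PySem.List.pyGetD numbers i 0))
      (PySem.List.pyGetD dp i []))

-- dp = [[0] * 21 for _ in range(n)]; dp[0][numbers[0]] = 1
def cveInit (n : Int) (numbers : List Int) : List (List Int) :=
  let dp0 : List (List Int) := (List.range n.toNat).map (fun _ => List.replicate 21 0)
  PySem.List.pySetD dp0 0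
    (PySem.List.pySetD (PySem.List.pyGetD dp0 0 []) (PySem.List.pyGetD numbers 0 0) 1)

def count_valid_equations (n : Int) (numbers : List Int) : Int :=
  -- return dp[n - 2][numbers[-1]] of the table after the sweep
  PySem.List.pyGetD
    (PySem.List.pyGetD
      ((PySem.List.pyRange 1 (n - 1) 1).foldl (cveStep numbers) (cveInit n numbers))
      (n - 2) [])
    (PySem.List.pyGetD numbers (-1) 0) 0

-- ===== PORT B =====
-- rec(i, j) with the memo dict threaded through (returns the value and the updated memo)
def cveRec (numbers : List Int) : Nat → Int → PySem.Dict (Int × Int) Int →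
    Int × PySem.Dict (Int × Int) Int
  | 0, j, memo => ((if j = PySem.List.pyGetD numbers 0 0 then 1 else 0), memo)
  | i + 1, j, memo =>
    match memo.get? ((i : Int) + 1, j) with
    | some v => (v, memo)
    | none =>
      let num := PySem.List.pyGetD numbers ((i : Int) + 1) 0
      let r1 := if j - num ≥ 0 then cveRec numbers i (j - num) memo else (0, memo)
      let r2 := if j + num ≤ 20 then cveRec numbers i (j + num) r1.2 else (0, r1.2)
      let total := r1.1 + r2.1
      (total, r2.2.insert ((i : Int) + 1, j) total)

def count_valid_equations_alt (n : Int) (numbers : List Int) : Int :=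
  if n = 1 then (cveRec numbers 0 (PySem.List.pyGetD numbers (-1) 0) PySem.Dict.empty).1
  else (cveRec numbers (n - 2).toNat (PySem.List.pyGetD numbers (-1) 0) PySem.Dict.empty).1

-- ===== PRECONDITION & SPEC =====
-- Pre_ restricts to the problem's natural domain plus the benign wrap cases: n counts the
-- numbers, there is at least one number, the middle operands A reads (positions 1..n-2) are
-- nonnegative, and the first and final numbers index into A's 21-cell row without raising
-- (-21..20; for n >= 3, where the sweep runs, they must be proper values 0..20).  It excludes
-- inputs on which A raises IndexError (n = 0, n too large for the list, first/last outside
-- -21..20, negative middles pushing an index past the row) and n >= 3 inputs with a negative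
-- first/last number, where A's wraparound interacts with the whole sweep.
def Pre_count_valid_equations (n : Int) (numbers : List Int) : Prop :=
  1 ≤ n ∧ n ≤ (numbers.length : Int) + 1 ∧ numbers ≠ [] ∧
    (∀ x ∈ (numbers.take (n - 1).toNat).drop 1, 0 ≤ x) ∧
    -21 ≤ numbers.headI ∧ numbers.headI ≤ 20 ∧
    -21 ≤ numbers.getLast?.getD 0 ∧ numbers.getLast?.getD 0 ≤ 20 ∧
    (3 ≤ n → 0 ≤ numbers.headI ∧ 0 ≤ numbers.getLast?.getD 0)
instance (n : Int) (numbers : List Int) : Decidable (Pre_count_valid_equations n numbers) := by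
  unfold Pre_count_valid_equations; infer_instance

def pvWitness_count_valid_equations : Int × List Int := (4, [1, 2, 3, 0])

-- On one- and two-number inputs whose first and last numbers differ by exactly 21, A's negative
-- index into the 21-cell first row wraps around onto the cell set for the first number and A
-- returns 1, while B returns 0 — the intended count, since a single number never equals a
-- different target value.
def D_count_valid_equations (n : Int) (numbers : List Int) : Prop :=
  n ≤ 2 ∧ (numbers.headI - numbers.getLast?.getD 0 = 21 ∨
           numbers.getLast?.getD 0 - numbers.headI = 21)
instance (n : Int) (numbers : List Int) : Decidable (D_count_valid_equations n numbers) := by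
  unfold D_count_valid_equations; infer_instance

def Spec_count_valid_equations (n : Int) (numbers : List Int) (out : Int) : Prop := ¬ D_count_valid_equations n numbers → out = count_valid_equations_alt n numbers
instance (n : Int) (numbers : List Int) (out : Int) : Decidable (Spec_count_valid_equations n numbers out) := by unfold Spec_count_valid_equations; infer_instance

def pvDiffWitness_count_valid_equations : Int × List Int := (2, [20, -1])
def pvDiffWitnessOut_count_valid_equations : Int × Int := (1, 0)

-- ===== CLAIM (what is proved, stated in full; the proofs are below) =====
def Claim_unchanged_count_valid_equations : Prop := ∀ (n : Int) (numbers : List Int), Dom_count_valid_equations n numbers → Pre_count_valid_equations n numbers → Spec_count_valid_equations n numbers (count_valid_equations n numbers)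
def Claim_changed_count_valid_equations : Prop := Dom_count_valid_equations (pvDiffWitness_count_valid_equations.1) (pvDiffWitness_count_valid_equations.2) ∧ Pre_count_valid_equations (pvDiffWitness_count_valid_equations.1) (pvDiffWitness_count_valid_equations.2) ∧ D_count_valid_equations (pvDiffWitness_count_valid_equations.1) (pvDiffWitness_count_valid_equations.2) ∧ count_valid_equations (pvDiffWitness_count_valid_equations.1) (pvDiffWitness_count_valid_equations.2) = pvDiffWitnessOut_count_valid_equations.1 ∧ count_valid_equations_alt (pvDiffWitness_count_valid_equations.1) (pvDiffWitness_count_valid_equations.2) = pvDiffWitnessOut_count_valid_equations.2 ∧ pvDiffWitnessOut_count_valid_equations.1 ≠ pvDiffWitnessOut_count_valid_equations.2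
def Claim_exact_count_valid_equations : Prop := ∀ (n : Int) (numbers : List Int), Dom_count_valid_equations n numbers → Pre_count_valid_equations n numbers → D_count_valid_equations n numbers → count_valid_equations n numbers ≠ count_valid_equations_alt n numbers

-- ===== LEMMAS AND PROOFS =====

-- the common recurrence both programs compute: cveWays numbers i j = number of ways
-- numbers[0..i] combines with +/- to the value j, keeping partial values in 0..20
def cveWays (numbers : List Int) : Nat → Int → Int
  | 0, j => if j = numbers.getD 0 0 then 1 else 0
  | i + 1, j =>
    let num := numbers.getD (i + 1) 0
    (if 0 ≤ j - num then cveWays numbers i (j - num) else 0) +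
    (if j + num ≤ 20 then cveWays numbers i (j + num) else 0)

lemma cveWays_nonneg (numbers : List Int) (i : Nat) (j : Int) : 0 ≤ cveWays numbers i j := by
  induction i generalizing j with
  | zero => simp only [cveWays]; split <;> omega
  | succ i ih =>
    simp only [cveWays]
    have h1 := ih (j - numbers.getD (i + 1) 0)
    have h2 := ih (j + numbers.getD (i + 1) 0)
    split <;> split <;> omega

def cveMemoOK (numbers : List Int) (m : PySem.Dict (Int × Int) Int) : Prop :=
  ∀ (i : Nat) (j : Int) (v : Int), m.get? ((i : Int), j) = some v → v = cveWays numbers i j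

lemma cveRec_correct (numbers : List Int) (i : Nat) (j : Int)
    (m : PySem.Dict (Int × Int) Int) (hm : cveMemoOK numbers m) :
    (cveRec numbers i j m).1 = cveWays numbers i j ∧ cveMemoOK numbers (cveRec numbers i j m).2 := by
  induction i generalizing j m with
  | zero =>
    refine ⟨?_, hm⟩
    simp [cveRec, cveWays, PySem.List.pyGetD_zero]
  | succ i ih =>
    rcases h : m.get? ((i : Int) + 1, j) with _ | v
    · simp only [cveRec, h]
      set num := PySem.List.pyGetD numbers ((i : Int) + 1) 0 with hnum
      have hnum' : num = numbers.getD (i + 1) 0 := by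
        rw [hnum]
        have : ((i : Int) + 1) = ((i + 1 : Nat) : Int) := by omega
        rw [this, PySem.List.pyGetD_natCast]
      have H1 : (if j - num ≥ 0 then cveRec numbers i (j - num) m else (0, m)).1
            = (if 0 ≤ j - num then cveWays numbers i (j - num) else 0)
          ∧ cveMemoOK numbers (if j - num ≥ 0 then cveRec numbers i (j - num) m else (0, m)).2 := by
        by_cases h1 : 0 ≤ j - num
        · simpa [ge_iff_le, Int.sub_nonneg, h1, Int.sub_nonneg.mp h1] using ih (j - num) m hm
        · simp only [ge_iff_le, Int.sub_nonneg] at h1 ⊢; simp [if_neg h1, hm]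
      set r1 := if j - num ≥ 0 then cveRec numbers i (j - num) m else (0, m) with hr1
      have H2 : (if j + num ≤ 20 then cveRec numbers i (j + num) r1.2 else (0, r1.2)).1
            = (if j + num ≤ 20 then cveWays numbers i (j + num) else 0)
          ∧ cveMemoOK numbers (if j + num ≤ 20 then cveRec numbers i (j + num) r1.2 else (0, r1.2)).2 := by
        by_cases h2 : j + num ≤ 20
        · simpa [h2] using ih (j + num) r1.2 H1.2
        · simp [h2, H1.2]
      set r2 := if j + num ≤ 20 then cveRec numbers i (j + num) r1.2 else (0, r1.2) with hr2
      have htot : r1.1 + r2.1 = cveWays numbers (i + 1) j := by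
        rw [H1.1, H2.1]; simp [cveWays, hnum']
      refine ⟨htot, ?_⟩
      intro i' j' v hv
      rw [PySem.Dict.get?_insert] at hv
      split at hv
      · rename_i heq
        have hi : i' = i + 1 := by
          have := congrArg Prod.fst heq
          simp at this; omega
        have hj : j' = j := (Prod.ext_iff.mp heq).2
        cases hv
        rw [hi, hj, ← htot]
      · exact H2.2 i' j' v hv
    · simp only [cveRec, h]
      constructor
      · have : ((i : Int) + 1) = ((i + 1 : Nat) : Int) := by omega
        rw [this] at h
        exact hm (i + 1) j v h
      · exact hm

lemma cveInner_length (prev : List Int) (num : Int) (row : List Int) (j : Int)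
    (h0j : 0 ≤ j) (hnum : 0 ≤ num) :
    (cveInner prev num row j).length = row.length := by
  unfold cveInner
  by_cases hpos : PySem.List.pyGetD prev j 0 > 0
  · rw [if_pos hpos]
    by_cases g1 : j + num ≤ 20
    · rw [if_pos g1]
      by_cases g2 : j - num ≥ 0
      · rw [if_pos g2, PySem.List.pySetD_of_nonneg _ _ (show (0:Int) ≤ j - num by omega),
          PySem.List.pySetD_of_nonneg _ _ (show (0:Int) ≤ j + num by omega)]
        simp
      · rw [if_neg g2, PySem.List.pySetD_of_nonneg _ _ (show (0:Int) ≤ j + num by omega)]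
        simp
    · rw [if_neg g1]
      by_cases g2 : j - num ≥ 0
      · rw [if_pos g2, PySem.List.pySetD_of_nonneg _ _ (show (0:Int) ≤ j - num by omega)]
        simp
      · rw [if_neg g2]
  · rw [if_neg hpos]

lemma getD_pySetD {α : Type} (row : List α) (a : Int) (v d : α) (k : Nat) (ha : 0 ≤ a)
    (hk : k < row.length) :
    (PySem.List.pySetD row a v).getD k d = if (k : Int) = a then v else row.getD k d := by
  rw [PySem.List.pySetD_of_nonneg _ _ ha]
  rcases eq_or_ne (k : Int) a with h | h
  · have : a.toNat = k := by omega
    rw [this, if_pos h, List.getD_eq_getElem _ _ (by simpa using hk), List.getElem_set_self]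
  · have hne : a.toNat ≠ k := by omega
    rw [if_neg h, List.getD_eq_getElem _ _ (by simpa using hk),
        List.getD_eq_getElem _ _ hk, List.getElem_set_ne hne]

lemma cveInner_getD (prev : List Int) (num : Int) (row : List Int) (j : Int) (k : Nat)
    (hrow : row.length = 21) (hk : k < 21) (h0j : 0 ≤ j) (hj : j ≤ 20) (hnum : 0 ≤ num)
    (hpj : 0 ≤ PySem.List.pyGetD prev j 0) :
    (cveInner prev num row j).getD k 0 =
      row.getD k 0 +
        ((if 0 ≤ j - num ∧ (k : Int) = j - num then PySem.List.pyGetD prev j 0 else 0) +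
         (if j + num ≤ 20 ∧ (k : Int) = j + num then PySem.List.pyGetD prev j 0 else 0)) := by
  set pv := PySem.List.pyGetD prev j 0 with hpv
  by_cases hpos : pv > 0
  · unfold cveInner
    rw [← hpv, if_pos hpos]
    by_cases g1 : j + num ≤ 20
    · rw [if_pos g1]
      set row1 := PySem.List.pySetD row (j + num) (PySem.List.pyGetD row (j + num) 0 + pv)
        with hr1
      have hlen1 : row1.length = 21 := by
        rw [hr1, PySem.List.pySetD_of_nonneg _ _ (show (0:Int) ≤ j + num by omega)]
        simpa using hrow
      have hrow1 : ∀ k' : Nat, k' < 21 →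
          row1.getD k' 0 =
            if (k' : Int) = j + num then row.getD (j + num).toNat 0 + pv
            else row.getD k' 0 := by
        intro k' hk'
        rw [hr1, PySem.List.pyGetD_of_nonneg _ _ (show (0:Int) ≤ j + num by omega),
          getD_pySetD _ _ _ _ _ (by omega) (by omega)]
      by_cases g2 : j - num ≥ 0
      · rw [if_pos g2]
        have hfin : (PySem.List.pySetD row1 (j - num)
              (PySem.List.pyGetD row1 (j - num) 0 + pv)).getD k 0 =
            if (k : Int) = j - num then row1.getD (j - num).toNat 0 + pv
            else row1.getD k 0 := by
          rw [PySem.List.pyGetD_of_nonneg _ _ (show (0:Int) ≤ j - num by omega),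
            getD_pySetD _ _ _ _ _ (by omega) (by omega)]
        rw [hfin]
        by_cases c2 : (k : Int) = j - num
        · rw [if_pos c2, hrow1 (j - num).toNat (by omega)]
          by_cases c1 : (k : Int) = j + num
          · have e : (((j - num).toNat : Int) = j + num) := by omega
            rw [if_pos e]
            have e2 : (j + num).toNat = k := by omega
            rw [e2, if_pos ⟨by omega, c2⟩, if_pos ⟨g1, c1⟩]
            ring
          · have e : ¬ (((j - num).toNat : Int) = j + num) := by omega
            rw [if_neg e]
            have e2 : (j - num).toNat = k := by omega
            rw [e2, if_pos ⟨by omega, c2⟩, if_neg (by tauto)]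
            ring
        · rw [if_neg c2, hrow1 k hk]
          by_cases c1 : (k : Int) = j + num
          · have e2 : (j + num).toNat = k := by omega
            rw [if_pos c1, e2, if_neg (by tauto), if_pos ⟨g1, c1⟩]
            ring
          · rw [if_neg c1, if_neg (by tauto), if_neg (by tauto)]
            ring
      · rw [if_neg g2]
        rw [hrow1 k hk]
        by_cases c1 : (k : Int) = j + num
        · have e2 : (j + num).toNat = k := by omega
          rw [if_pos c1, e2, if_neg (by omega : ¬ (0 ≤ j - num ∧ (k:Int) = j - num)),
            if_pos ⟨g1, c1⟩]
          ring
        · rw [if_neg c1, if_neg (by omega : ¬ (0 ≤ j - num ∧ (k:Int) = j - num)),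
            if_neg (by tauto)]
          ring
    · rw [if_neg g1]
      by_cases g2 : j - num ≥ 0
      · rw [if_pos g2]
        have hfin : (PySem.List.pySetD row (j - num)
              (PySem.List.pyGetD row (j - num) 0 + pv)).getD k 0 =
            if (k : Int) = j - num then row.getD (j - num).toNat 0 + pv
            else row.getD k 0 := by
          rw [PySem.List.pyGetD_of_nonneg _ _ (show (0:Int) ≤ j - num by omega),
            getD_pySetD _ _ _ _ _ (by omega) (by omega)]
        rw [hfin]
        by_cases c2 : (k : Int) = j - num
        · have e2 : (j - num).toNat = k := by omega
          rw [if_pos c2, e2, if_pos ⟨by omega, c2⟩, if_neg (by tauto)]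
          ring
        · rw [if_neg c2, if_neg (by tauto), if_neg (by tauto)]
          ring
      · rw [if_neg g2]
        rw [if_neg (by omega : ¬ (0 ≤ j - num ∧ (k:Int) = j - num)), if_neg (by tauto)]
        ring
  · have hz : pv = 0 := by omega
    unfold cveInner
    rw [← hpv, if_neg hpos, hz]
    split_ifs <;> simp

lemma cveFold_getD (prev : List Int) (num : Int) (hnum : 0 ≤ num)
    (l : List Int) (row : List Int) (hl : ∀ j ∈ l, 0 ≤ j ∧ j ≤ 20) (hrow : row.length = 21)
    (hpn : ∀ jj : Int, 0 ≤ jj → jj ≤ 20 → 0 ≤ PySem.List.pyGetD prev jj 0) :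
    (∀ k : Nat, k < 21 →
      (l.foldl (cveInner prev num) row).getD k 0 =
        row.getD k 0 + (l.map (fun j =>
          (if 0 ≤ j - num ∧ (k : Int) = j - num then PySem.List.pyGetD prev j 0 else 0) +
          (if j + num ≤ 20 ∧ (k : Int) = j + num then PySem.List.pyGetD prev j 0 else 0))).sum)
    ∧ (l.foldl (cveInner prev num) row).length = 21 := by
  induction l generalizing row with
  | nil => simpa using hrow
  | cons j l ih =>
    have hj := hl j (by simp)
    have hrow' : (cveInner prev num row j).length = 21 := by
      rw [cveInner_length prev num row j hj.1 hnum]; exact hrow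
    have IH := ih (cveInner prev num row j) (fun x hx => hl x (by simp [hx])) hrow'
    refine ⟨?_, by simpa using IH.2⟩
    intro k hk
    have h1 := IH.1 k hk
    simp only [List.foldl_cons] at *
    rw [h1, cveInner_getD prev num row j k hrow hk hj.1 hj.2 hnum (hpn j hj.1 hj.2)]
    simp only [List.map_cons, List.sum_cons]
    ring

lemma sum_pick (N : Nat) (t : Int) (f : Int → Int) :
    ((List.range N).map (fun jn => if ((jn : Nat) : Int) = t then f t else 0)).sum
      = if 0 ≤ t ∧ t < (N : Int) then f t else 0 := by
  induction N with
  | zero =>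
    rw [if_neg (by omega)]
    simp
  | succ N ih =>
    rw [List.range_succ, List.map_append, List.sum_append, ih]
    simp only [List.map_cons, List.map_nil, List.sum_cons, List.sum_nil]
    by_cases hN : ((N : Nat) : Int) = t
    · rw [if_pos hN, if_neg (by omega), if_pos (by omega)]
      omega
    · rw [if_neg hN]
      by_cases h : 0 ≤ t ∧ t < (N : Int)
      · rw [if_pos h, if_pos (by push_cast; omega)]; omega
      · rw [if_neg h, if_neg (by push_cast at *; omega)]; omega

lemma cveRow (prev : List Int) (num : Int) (hnum : 0 ≤ num)
    (hpn : ∀ jj : Int, 0 ≤ jj → jj ≤ 20 → 0 ≤ PySem.List.pyGetD prev jj 0)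
    (k : Int) (hk0 : 0 ≤ k) (hk : k ≤ 20) :
    PySem.List.pyGetD
        ((PySem.List.pyRange 0 21 1).foldl (cveInner prev num) (List.replicate 21 0)) k 0
      = (if 0 ≤ k - num then PySem.List.pyGetD prev (k - num) 0 else 0)
      + (if k + num ≤ 20 then PySem.List.pyGetD prev (k + num) 0 else 0) := by
  have hrange : PySem.List.pyRange 0 21 1 = (List.range 21).map (fun jn => ((jn : Nat) : Int)) := by
    rw [show ((21:Int) = ((21:Nat):Int)) by norm_num, PySem.List.pyRange_zero_natCast]
  have hmem : ∀ j ∈ PySem.List.pyRange 0 21 1, 0 ≤ j ∧ j ≤ 20 := by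
    rw [hrange]; intro j hj
    simp only [List.mem_map, List.mem_range] at hj
    obtain ⟨jn, hjn, rfl⟩ := hj; omega
  have H := (cveFold_getD prev num hnum _ (List.replicate 21 0) hmem (by simp) hpn).1
    k.toNat (by omega)
  rw [PySem.List.pyGetD_of_nonneg _ _ hk0, H, hrange, List.map_map]
  have e0 : (List.replicate 21 (0:Int)).getD k.toNat 0 = 0 := by
    rw [List.getD_eq_getElem _ _ (by simpa using (show k.toNat < 21 by omega)),
      List.getElem_replicate]
  rw [e0, zero_add]
  have hsplit : ((List.range 21).map
      ((fun j =>
          (if 0 ≤ j - num ∧ (k.toNat : Int) = j - num then PySem.List.pyGetD prev j 0 else 0) +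
          (if j + num ≤ 20 ∧ (k.toNat : Int) = j + num then PySem.List.pyGetD prev j 0 else 0))
        ∘ (fun jn => ((jn : Nat) : Int)))).sum
      = ((List.range 21).map (fun jn =>
          if ((jn : Nat) : Int) = k + num then PySem.List.pyGetD prev (k + num) 0 else 0)).sum
      + ((List.range 21).map (fun jn =>
          if ((jn : Nat) : Int) = k - num then PySem.List.pyGetD prev (k - num) 0 else 0)).sum := by
    rw [← PySem.List.sum_map_add_int]
    apply congrArg
    apply List.map_congr_left
    intro jn hjn
    simp only [Function.comp_apply]
    have hkt : ((k.toNat : Int)) = k := by omega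
    rw [hkt]
    set jj := ((jn : Nat) : Int) with hjj
    have hA : (0 ≤ jj - num ∧ k = jj - num) ↔ jj = k + num := by omega
    have hB : (jj + num ≤ 20 ∧ k = jj + num) ↔ jj = k - num := by omega
    simp only [hA, hB]
    by_cases c1 : jj = k + num
    · by_cases c2 : jj = k - num
      · rw [← c1, ← c2]
      · rw [← c1]; simp [c2]
    · by_cases c2 : jj = k - num
      · rw [← c2]; simp [c1]
      · simp [c1, c2]
  rw [hsplit, sum_pick 21 (k + num) (fun t => PySem.List.pyGetD prev t 0),
    sum_pick 21 (k - num) (fun t => PySem.List.pyGetD prev t 0)]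
  have hc1 : (0 ≤ k + num ∧ k + num < ((21:Nat):Int)) ↔ (k + num ≤ 20) := by omega
  have hc2 : (0 ≤ k - num ∧ k - num < ((21:Nat):Int)) ↔ (0 ≤ k - num) := by omega
  simp only [hc1, hc2]
  exact add_comm _ _


lemma numbers_getD_nonneg (numbers : List Int) (K : Nat)
    (hnn : ∀ x ∈ (numbers.take K).drop 1, 0 ≤ x) (idx : Nat) (h1 : 1 ≤ idx) (hidx : idx < K) :
    0 ≤ numbers.getD idx 0 := by
  unfold List.getD
  cases h : numbers[idx]? with
  | none => simp
  | some v =>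
    have hlt : idx < numbers.length := (List.getElem?_eq_some_iff.mp h).1
    have hv : numbers[idx] = v := by simpa [List.getElem?_eq_getElem hlt] using h
    have hm : v ∈ (numbers.take K).drop 1 := by
      have e : ((numbers.take K).drop 1)[idx - 1]'(by simp; omega) = numbers[idx] := by
        rw [List.getElem_drop, List.getElem_take]
        congr 1
        omega
      exact hv ▸ e ▸ List.getElem_mem _
    simpa using hnn v hm

lemma cveInit_facts (n : Int) (numbers : List Int) (hn : 1 ≤ n)
    (hh0 : 0 ≤ numbers.getD 0 0) :
    (cveInit n numbers).length = n.toNat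
    ∧ (∀ r : Nat, r < n.toNat → ((cveInit n numbers).getD r []).length = 21)
    ∧ (∀ jj : Int, 0 ≤ jj → jj ≤ 20 →
        PySem.List.pyGetD ((cveInit n numbers).getD 0 []) jj 0 = cveWays numbers 0 jj)
    ∧ (∀ r : Nat, 0 < r → r < n.toNat → (cveInit n numbers).getD r [] = List.replicate 21 0) := by
  have hdp0 : (List.range n.toNat).map (fun _ => List.replicate 21 (0:Int))
      = List.replicate n.toNat (List.replicate 21 (0:Int)) := by
    simp [List.map_const']
  have hN : 0 < n.toNat := by omega
  unfold cveInit
  simp only [hdp0]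
  set rep0 : List Int := List.replicate 21 0 with hrep0
  have hget0 : PySem.List.pyGetD (List.replicate n.toNat rep0) 0 [] = rep0 := by
    rw [PySem.List.pyGetD_zero, List.getD_replicate _ hN]
  have hnum0 : PySem.List.pyGetD numbers 0 0 = numbers.getD 0 0 := PySem.List.pyGetD_zero _ _
  rw [hget0, hnum0]
  set row0 := PySem.List.pySetD rep0 (numbers.getD 0 0) 1 with hrow0
  have hrow0len : row0.length = 21 := by
    rw [hrow0, PySem.List.pySetD_of_nonneg _ _ hh0]
    simp [hrep0]
  have hsetlen : (List.replicate n.toNat rep0).length = n.toNat := by simp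
  have hgetr : ∀ r : Nat, r < n.toNat →
      (PySem.List.pySetD (List.replicate n.toNat rep0) 0 row0).getD r []
        = if (r : Int) = 0 then row0 else rep0 := by
    intro r hr
    rw [getD_pySetD _ _ _ _ _ (by omega) (by simpa using hr)]
    rcases eq_or_ne ((r:Int)) 0 with h | h
    · rw [if_pos h, if_pos h]
    · rw [if_neg h, if_neg h, List.getD_replicate _ hr]
  refine ⟨?_, ?_, ?_, ?_⟩
  · rw [PySem.List.pySetD_of_nonneg _ _ le_rfl]
    simp
  · intro r hr
    rw [hgetr r hr]
    rcases eq_or_ne ((r:Int)) 0 with h | h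
    · rw [if_pos h]; exact hrow0len
    · rw [if_neg h]; simp [hrep0]
  · intro jj h0 h20
    rw [hgetr 0 hN, if_pos (by norm_num)]
    rw [hrow0, PySem.List.pyGetD_of_nonneg _ _ h0,
      getD_pySetD _ _ _ _ _ hh0 (by simp [hrep0]; omega)]
    have hcast : ((jj.toNat : Int)) = jj := by omega
    rw [hcast]
    rcases eq_or_ne jj (numbers.getD 0 0) with h | h
    · rw [if_pos h]
      simp only [cveWays]
      rw [if_pos h]
    · rw [if_neg h, List.getD_replicate _ (by omega)]
      simp only [cveWays]
      rw [if_neg h]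
  · intro r hr0 hr
    rw [hgetr r hr, if_neg (by omega)]

lemma cveOuter (numbers : List Int) (n : Int) (hn : 1 ≤ n)
    (hnn : ∀ x ∈ (numbers.take (n - 1).toNat).drop 1, 0 ≤ x) (hh0 : 0 ≤ numbers.getD 0 0) :
    ∀ (m : Nat), (m : Int) ≤ n - 2 →
      ((PySem.List.pyRange 1 ((m : Int) + 1) 1).foldl (cveStep numbers)
          (cveInit n numbers)).length = n.toNat
      ∧ (∀ r : Nat, r < n.toNat →
          (((PySem.List.pyRange 1 ((m : Int) + 1) 1).foldl (cveStep numbers)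
            (cveInit n numbers)).getD r []).length = 21)
      ∧ (∀ jj : Int, 0 ≤ jj → jj ≤ 20 →
          PySem.List.pyGetD (((PySem.List.pyRange 1 ((m : Int) + 1) 1).foldl (cveStep numbers)
            (cveInit n numbers)).getD m []) jj 0 = cveWays numbers m jj)
      ∧ (∀ r : Nat, m < r → r < n.toNat →
          ((PySem.List.pyRange 1 ((m : Int) + 1) 1).foldl (cveStep numbers)
            (cveInit n numbers)).getD r [] = List.replicate 21 0) := by
  intro m
  induction m with
  | zero =>
    intro _
    have hrange : PySem.List.pyRange 1 (((0:Nat):Int) + 1) 1 = [] := by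
      rw [PySem.List.pyRange_one]; norm_num
    rw [hrange]
    simp only [List.foldl_nil]
    exact cveInit_facts n numbers hn hh0
  | succ m ih =>
    intro hm1
    have hm : (m : Int) ≤ n - 2 := by omega
    obtain ⟨IH1, IH2, IH3, IH4⟩ := ih hm
    have hrange : PySem.List.pyRange 1 (((m + 1 : Nat) : Int) + 1) 1
        = PySem.List.pyRange 1 ((m : Int) + 1) 1 ++ [(m : Int) + 1] := by
      have : (((m + 1 : Nat) : Int) + 1) = ((m : Int) + 1) + 1 := by omega
      rw [this, PySem.List.pyRange_one_succ_right (by omega)]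
    rw [hrange, List.foldl_append, List.foldl_cons, List.foldl_nil]
    set dpm := (PySem.List.pyRange 1 ((m : Int) + 1) 1).foldl (cveStep numbers)
      (cveInit n numbers) with hdpm
    have hm1N : m + 1 < n.toNat := by omega
    -- unfold one step
    unfold cveStep
    have hprev : PySem.List.pyGetD dpm ((m : Int) + 1 - 1) [] = dpm.getD m [] := by
      have e : ((m : Int) + 1 - 1) = ((m : Nat) : Int) := by omega
      rw [e, PySem.List.pyGetD_natCast]
    have hstart : PySem.List.pyGetD dpm ((m : Int) + 1) [] = List.replicate 21 0 := by
      have e : ((m : Int) + 1) = (((m + 1 : Nat)) : Int) := by omega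
      rw [e, PySem.List.pyGetD_natCast]
      exact IH4 (m + 1) (by omega) hm1N
    have hnum : PySem.List.pyGetD numbers ((m : Int) + 1) 0 = numbers.getD (m + 1) 0 := by
      have e : ((m : Int) + 1) = (((m + 1 : Nat)) : Int) := by omega
      rw [e, PySem.List.pyGetD_natCast]
    rw [hprev, hstart, hnum]
    set num := numbers.getD (m + 1) 0 with hnumdef
    set prev := dpm.getD m [] with hprevdef
    have hnum0 : 0 ≤ num := numbers_getD_nonneg numbers (n - 1).toNat hnn (m + 1) (by omega) (by omega)
    have hpn : ∀ jj : Int, 0 ≤ jj → jj ≤ 20 → 0 ≤ PySem.List.pyGetD prev jj 0 := by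
      intro jj h0 h20
      rw [hprevdef, IH3 jj h0 h20]
      exact cveWays_nonneg numbers m jj
    set newrow := (PySem.List.pyRange 0 21 1).foldl (cveInner prev num) (List.replicate 21 0)
      with hnewrow
    have hmemr : ∀ j ∈ PySem.List.pyRange 0 21 1, 0 ≤ j ∧ j ≤ 20 := by
      intro j hj
      rw [show ((21:Int) = ((21:Nat):Int)) by norm_num, PySem.List.pyRange_zero_natCast] at hj
      simp only [List.mem_map, List.mem_range] at hj
      obtain ⟨jn, hjn, rfl⟩ := hj; omega
    have hnewlen : newrow.length = 21 :=
      (cveFold_getD prev num hnum0 _ (List.replicate 21 0) hmemr (by simp) hpn).2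
    have hgetr : ∀ r : Nat, r < n.toNat →
        (PySem.List.pySetD dpm ((m : Int) + 1) newrow).getD r []
          = if (r : Int) = (m : Int) + 1 then newrow else dpm.getD r [] := by
      intro r hr
      exact getD_pySetD _ _ _ _ _ (by omega) (by omega)
    refine ⟨?_, ?_, ?_, ?_⟩
    · rw [PySem.List.pySetD_of_nonneg _ _ (by omega)]
      simpa using IH1
    · intro r hr
      rw [hgetr r hr]
      rcases eq_or_ne ((r : Int)) ((m : Int) + 1) with h | h
      · rw [if_pos h]; exact hnewlen
      · rw [if_neg h]; exact IH2 r hr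
    · intro jj h0 h20
      rw [hgetr (m + 1) hm1N, if_pos (by omega)]
      rw [hnewrow, cveRow prev num hnum0 hpn jj h0 h20]
      have e1 : (0 ≤ jj - num) → PySem.List.pyGetD prev (jj - num) 0
          = cveWays numbers m (jj - num) := fun h => IH3 _ h (by omega)
      have e2 : (jj + num ≤ 20) → PySem.List.pyGetD prev (jj + num) 0
          = cveWays numbers m (jj + num) := fun h => IH3 _ (by omega) h
      simp only [cveWays]
      rw [← hnumdef]
      by_cases d1 : 0 ≤ jj - num <;> by_cases d2 : jj + num ≤ 20
      · rw [if_pos d1, if_pos d2, if_pos d1, if_pos d2, e1 d1, e2 d2]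
      · rw [if_pos d1, if_neg d2, if_pos d1, if_neg d2, e1 d1]
      · rw [if_neg d1, if_pos d2, if_neg d1, if_pos d2, e2 d2]
      · rw [if_neg d1, if_neg d2, if_neg d1, if_neg d2]
    · intro r hr hrN
      rw [hgetr r hrN, if_neg (by omega)]
      exact IH4 r (by omega) hrN

lemma cveMemoOK_empty (numbers : List Int) : cveMemoOK numbers PySem.Dict.empty := by
  intro i j v h
  rw [PySem.Dict.get?_empty] at h
  exact absurd h (by simp)

-- Python's negative in-range index on a 21-cell row: write …
lemma pySetD_rep_neg (a : Int) (h1 : -21 ≤ a) (h2 : a < 0) :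
    PySem.List.pySetD (List.replicate 21 (0:Int)) a 1
      = (List.replicate 21 (0:Int)).set (21 + a).toNat 1 := by
  simp only [PySem.List.pySetD, PySem.List.pySet?, PySem.List.pyIdx?]
  rw [if_neg (by omega), if_pos (by simp; omega)]
  simp
  congr 1
  omega

-- … and read
lemma pyGetD_row_neg (v : Int) (h1 : -21 ≤ v) (h2 : v < 0) (row : List Int)
    (hr : row.length = 21) :
    PySem.List.pyGetD row v 0 = row.getD (21 + v).toNat 0 := by
  simp only [PySem.List.pyGetD, PySem.List.pyGet?, PySem.List.pyIdx?]
  rw [if_neg (by omega), if_pos (by simp [hr]; omega)]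
  have e : row.length - (-v).toNat = (21 + v).toNat := by omega
  rw [e, List.getD_eq_getElem?_getD]
  simp

lemma set_rep_getD (aN vN : Nat) (ha : aN < 21) (hv : vN < 21) :
    ((List.replicate 21 (0:Int)).set aN 1).getD vN 0 = if vN = aN then 1 else 0 := by
  rcases eq_or_ne vN aN with h | h
  · subst h
    rw [if_pos rfl, List.getD_eq_getElem _ _ (by simp; omega), List.getElem_set_self]
  · rw [if_neg h, List.getD_eq_getElem _ _ (by simp; omega), List.getElem_set_ne (by omega),
      List.getElem_replicate]

-- reading cell v of row 0 after dp[0][a] = 1, with Python index wraparound on both sides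
lemma rowIdx (a v : Int) (ha1 : -21 ≤ a) (ha2 : a ≤ 20) (hv1 : -21 ≤ v) (hv2 : v ≤ 20) :
    PySem.List.pyGetD (PySem.List.pySetD (List.replicate 21 (0:Int)) a 1) v 0
      = if v = a ∨ v - a = 21 ∨ a - v = 21 then 1 else 0 := by
  have hrow : PySem.List.pySetD (List.replicate 21 (0:Int)) a 1
      = (List.replicate 21 (0:Int)).set (if 0 ≤ a then a.toNat else (21 + a).toNat) 1 := by
    by_cases sa : 0 ≤ a
    · rw [if_pos sa, PySem.List.pySetD_of_nonneg _ _ sa]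
    · rw [if_neg sa]
      exact pySetD_rep_neg a ha1 (by omega)
  have hlen : (PySem.List.pySetD (List.replicate 21 (0:Int)) a 1).length = 21 := by
    rw [hrow]; simp
  have hread : PySem.List.pyGetD (PySem.List.pySetD (List.replicate 21 (0:Int)) a 1) v 0
      = ((List.replicate 21 (0:Int)).set (if 0 ≤ a then a.toNat else (21 + a).toNat) 1).getD
          (if 0 ≤ v then v.toNat else (21 + v).toNat) 0 := by
    by_cases sv : 0 ≤ v
    · rw [if_pos sv, PySem.List.pyGetD_of_nonneg _ _ sv, hrow]
    · rw [if_neg sv, pyGetD_row_neg v hv1 (by omega) _ hlen, hrow]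
  rw [hread, set_rep_getD _ _ (by split_ifs <;> omega) (by split_ifs <;> omega)]
  have hiff : ((if 0 ≤ v then v.toNat else (21 + v).toNat)
        = (if 0 ≤ a then a.toNat else (21 + a).toNat))
      ↔ (v = a ∨ v - a = 21 ∨ a - v = 21) := by
    split_ifs <;> omega
  simp only [hiff]

-- both programs on the n ≤ 2 inputs, where only row 0 is ever consulted
lemma cveSmall (n : Int) (numbers : List Int) (hn : 1 ≤ n) (hn2 : n ≤ 2)
    (hne : numbers ≠ []) (hf1 : -21 ≤ numbers.headI) (hf2 : numbers.headI ≤ 20)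
    (hl1 : -21 ≤ numbers.getLast?.getD 0) (hl2 : numbers.getLast?.getD 0 ≤ 20) :
    count_valid_equations n numbers
      = (if numbers.getLast?.getD 0 = numbers.headI
           ∨ numbers.getLast?.getD 0 - numbers.headI = 21
           ∨ numbers.headI - numbers.getLast?.getD 0 = 21 then 1 else 0)
    ∧ count_valid_equations_alt n numbers
      = (if numbers.getLast?.getD 0 = numbers.headI then 1 else 0) := by
  have hhead : numbers.getD 0 0 = numbers.headI := by
    cases numbers with
    | nil => simp at hne
    | cons x l => simp
  have hlastval : PySem.List.pyGetD numbers (-1) 0 = numbers.getLast?.getD 0 := by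
    rw [PySem.List.pyGetD_neg_one _ _ hne, List.getLast?_eq_some_getLast hne]
    simp
  constructor
  · unfold count_valid_equations
    have hrange : PySem.List.pyRange 1 (n - 1) 1 = [] := by
      rw [PySem.List.pyRange_one, show (n - 1 - 1).toNat = 0 from by omega]
      simp
    rw [hrange]
    simp only [List.foldl_nil]
    unfold cveInit
    have hdp0 : (List.range n.toNat).map (fun _ => List.replicate 21 (0:Int))
        = List.replicate n.toNat (List.replicate 21 (0:Int)) := by
      simp [List.map_const']
    simp only [hdp0]
    have hget0 : PySem.List.pyGetD (List.replicate n.toNat (List.replicate 21 (0:Int))) 0 []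
        = List.replicate 21 0 := by
      rw [PySem.List.pyGetD_zero, List.getD_replicate _ (by omega)]
    rw [hget0, PySem.List.pyGetD_zero]
    set row0 := PySem.List.pySetD (List.replicate 21 (0:Int)) (numbers.getD 0 0) 1 with hrow0
    have hdp : PySem.List.pySetD (List.replicate n.toNat (List.replicate 21 (0:Int))) 0 row0
        = (List.replicate n.toNat (List.replicate 21 (0:Int))).set 0 row0 :=
      PySem.List.pySetD_of_nonneg _ _ le_rfl
    rw [hdp]
    have hrd : PySem.List.pyGetD
        ((List.replicate n.toNat (List.replicate 21 (0:Int))).set 0 row0) (n - 2) [] = row0 := by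
      rcases (show n = 1 ∨ n = 2 from by omega) with h | h
      -- n = 1: dp[-1] is the single row; n = 2: dp[0]
      · subst h
        have edp : (List.replicate (Int.toNat 1) (List.replicate 21 (0:Int))).set 0 row0
            = [row0] := rfl
        rw [edp, show ((1:Int) - 2) = -1 from by norm_num,
          PySem.List.pyGetD_neg_one _ _ (by simp)]
        simp
      · subst h
        have edp : (List.replicate (Int.toNat 2) (List.replicate 21 (0:Int))).set 0 row0
            = [row0, List.replicate 21 0] := rfl
        rw [edp, show ((2:Int) - 2) = 0 from by norm_num, PySem.List.pyGetD_zero]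
        simp
    rw [hrd, hlastval, hrow0, hhead]
    exact rowIdx _ _ hf1 hf2 hl1 hl2
  · unfold count_valid_equations_alt
    have hrec : (cveRec numbers 0 (PySem.List.pyGetD numbers (-1) 0) PySem.Dict.empty).1
        = cveWays numbers 0 (PySem.List.pyGetD numbers (-1) 0) :=
      (cveRec_correct numbers 0 _ _ (cveMemoOK_empty numbers)).1
    rcases (show n = 1 ∨ n = 2 from by omega) with h | h
    · subst h
      rw [if_pos rfl, hrec, hlastval]
      simp only [cveWays]
      rw [hhead]
    · subst h
      rw [if_neg (by norm_num), show ((2:Int) - 2).toNat = 0 from by norm_num, hrec, hlastval]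
      simp only [cveWays]
      rw [hhead]

theorem count_valid_equations_spec : Claim_unchanged_count_valid_equations := by
  intro n numbers _ hpre
  obtain ⟨hn, hlen, hne, hmid, hf1, hf2, hl1, hl2, h3⟩ := hpre
  unfold Spec_count_valid_equations
  intro hND
  by_cases hsmall : n ≤ 2
  · obtain ⟨hA, hB⟩ := cveSmall n numbers hn hsmall hne hf1 hf2 hl1 hl2
    rw [hA, hB]
    have hno : ¬ (numbers.getLast?.getD 0 - numbers.headI = 21
        ∨ numbers.headI - numbers.getLast?.getD 0 = 21) := by
      intro hc
      exact hND ⟨hsmall, by omega⟩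
    have e : (numbers.getLast?.getD 0 = numbers.headI
          ∨ numbers.getLast?.getD 0 - numbers.headI = 21
          ∨ numbers.headI - numbers.getLast?.getD 0 = 21)
        ↔ (numbers.getLast?.getD 0 = numbers.headI) := by
      constructor
      · rintro (h | h | h)
        · exact h
        · exact absurd (Or.inl h) hno
        · exact absurd (Or.inr h) hno
      · exact Or.inl
    simp only [e]
  · have h2 : 3 ≤ n := by omega
    obtain ⟨hh0', hl0'⟩ := h3 h2
    have hh0 : 0 ≤ numbers.getD 0 0 := by
      cases numbers with
      | nil => simp at hne
      | cons a l => simpa using hh0'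
    have hh20 : numbers.getD 0 0 ≤ 20 := by
      cases numbers with
      | nil => simp at hne
      | cons a l => simpa using hf2
    have hlastval : PySem.List.pyGetD numbers (-1) 0 = numbers.getLast hne :=
      PySem.List.pyGetD_neg_one _ _ hne
    have hlast20 : numbers.getLast hne ≤ 20 := by
      rw [List.getLast?_eq_some_getLast hne] at hl2
      simpa using hl2
    have hlast0 : 0 ≤ numbers.getLast hne := by
      rw [List.getLast?_eq_some_getLast hne] at hl0'
      simpa using hl0'
    set m := (n - 2).toNat with hm
    have hmi : ((m : Int)) = n - 2 := by omega
    obtain ⟨L1, L2, L3, L4⟩ := cveOuter numbers n hn hmid hh0 m (by omega)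
    unfold count_valid_equations
    have e : n - 1 = (m : Int) + 1 := by omega
    rw [e, hlastval]
    have hfin : PySem.List.pyGetD
        ((PySem.List.pyRange 1 ((m : Int) + 1) 1).foldl (cveStep numbers)
          (cveInit n numbers)) (n - 2) []
        = ((PySem.List.pyRange 1 ((m : Int) + 1) 1).foldl (cveStep numbers)
          (cveInit n numbers)).getD m [] := by
      rw [← hmi, PySem.List.pyGetD_natCast]
    rw [hfin, L3 _ hlast0 hlast20]
    unfold count_valid_equations_alt
    rw [if_neg (by omega), hlastval,
      (cveRec_correct numbers m (numbers.getLast hne) _ (cveMemoOK_empty numbers)).1]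

theorem count_valid_equations_changed : Claim_changed_count_valid_equations := by
  unfold Claim_changed_count_valid_equations
  decide

theorem count_valid_equations_tight : Claim_exact_count_valid_equations := by
  intro n numbers _ hpre hd
  obtain ⟨hn, hlen, hne, hmid, hf1, hf2, hl1, hl2, h3⟩ := hpre
  obtain ⟨hn2, hdiff⟩ := hd
  obtain ⟨hA, hB⟩ := cveSmall n numbers hn hn2 hne hf1 hf2 hl1 hl2
  rw [hA, hB, if_pos (by omega), if_neg (by omega)]
  norm_num
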